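-- pv_equiv track=rewrite | github.com/dhimarketer/newDirReact | django_backend/analyze_name_parts_for_gender.py | detect_gender_by_name_prefix
-- ===== SOURCE A (Python) =====
-- def detect_gender_by_name_prefix(name, male_prefixes, female_prefixes):
--     """Detect gender based on name prefixes from top frequent name parts"""
--     if not name:
--         return None
--
--     name_lower = name.lower().strip()
--
--     # Check if name starts with any of the top female prefixes
--     for female_prefix in female_prefixes:
--         if name_lower.startswith(female_prefix.lower()):
--             return 'f'
--
--     # Check if name starts with any of the top male prefixes
--     for male_prefix in male_prefixes:
--         if name_lower.startswith(male_prefix.lower()):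
--             return 'm'
--
--     return None
-- ===== SOURCE B (Python) =====
-- def _probe(n, prefixes):
--     pset = {p.lower() for p in prefixes}
--     lens = {len(p) for p in pset}
--     return any(n[:L] in pset for L in lens if L <= len(n))
--
--
-- def detect_gender_by_name_prefix(name, male_prefixes, female_prefixes):
--     """Detect gender by hashing the lowered prefixes and probing the name's prefixes of matching lengths."""
--     if not name:
--         return None
--     n = name.lower().strip()
--     if _probe(n, female_prefixes):
--         return 'f'
--     if _probe(n, male_prefixes):
--         return 'm'
--     return None
-- ===== Notes on version B (the rewrite author's own statement) =====
-- stated objective: alternative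
-- what changed: Instead of scanning each prefix list with startswith per prefix, B builds a hash set of the lowered prefixes plus the set of their lengths once per gender, then probes the name's own prefixes of exactly those lengths for set membership, inverting the traversal.
import Mathlib
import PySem

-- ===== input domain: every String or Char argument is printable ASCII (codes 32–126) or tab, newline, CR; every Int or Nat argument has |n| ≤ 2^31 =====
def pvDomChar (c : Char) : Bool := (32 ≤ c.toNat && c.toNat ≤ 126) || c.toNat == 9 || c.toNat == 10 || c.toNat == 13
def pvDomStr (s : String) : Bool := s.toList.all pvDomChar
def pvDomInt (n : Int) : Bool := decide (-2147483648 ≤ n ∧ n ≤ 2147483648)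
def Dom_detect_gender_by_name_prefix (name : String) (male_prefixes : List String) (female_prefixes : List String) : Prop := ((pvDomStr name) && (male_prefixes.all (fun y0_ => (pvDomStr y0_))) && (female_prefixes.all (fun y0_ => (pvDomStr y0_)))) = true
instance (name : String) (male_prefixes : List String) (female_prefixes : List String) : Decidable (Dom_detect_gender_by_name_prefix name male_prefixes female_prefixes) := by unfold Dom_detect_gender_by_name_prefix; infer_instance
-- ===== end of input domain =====

-- B replaces A's per-prefix startswith scans by a hash set of lowered prefixes probed with each prefix of the name (alternative traversal; return value only).

-- ===== PORT A =====
-- the for-loop with early 'return tag' over a prefix list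
def pvScanA (n : List Char) (ps : List String) (tag : String) : Option String :=
  match ps with
  | [] => none
  | p :: rest =>
      if PySem.Chars.startswith n (PySem.Chars.lower p.toList) then some tag
      else pvScanA n rest tag

def detect_gender_by_name_prefix (name : String) (male_prefixes : List String) (female_prefixes : List String) : Option String :=
  if name = "" then none
  else
    let name_lower := PySem.Chars.strip (PySem.Chars.lower name.toList)
    match pvScanA name_lower female_prefixes "f" with
    | some g => some g
    | none => pvScanA name_lower male_prefixes "m"

-- ===== PORT B =====
-- {p.lower() for p in ps}
def pvPrefixSet (ps : List String) : PySem.Set (List Char) :=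
  PySem.Set.ofList (ps.map (fun p => PySem.Chars.lower p.toList))

-- lens = {len(p) for p in pset}; any(n[:L] in pset for L in lens if L <= len(n))
def pvProbe (n : List Char) (pset : PySem.Set (List Char)) : Bool :=
  (PySem.Set.ofList (pset.map (fun q => (q.length : Int)))).any
    (fun L => L ≤ (n.length : Int) && PySem.Set.contains pset (PySem.List.slice n none (some L)))

def detect_gender_by_name_prefix_alt (name : String) (male_prefixes : List String) (female_prefixes : List String) : Option String :=
  if name = "" then none
  else
    let n := PySem.Chars.strip (PySem.Chars.lower name.toList)
    if pvProbe n (pvPrefixSet female_prefixes) then some "f"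
    else if pvProbe n (pvPrefixSet male_prefixes) then some "m"
    else none

-- ===== PRECONDITION & SPEC =====
def Spec_detect_gender_by_name_prefix (name : String) (male_prefixes : List String) (female_prefixes : List String) (out : Option String) : Prop := out = detect_gender_by_name_prefix_alt name male_prefixes female_prefixes
instance (name : String) (male_prefixes : List String) (female_prefixes : List String) (out : Option String) : Decidable (Spec_detect_gender_by_name_prefix name male_prefixes female_prefixes out) := by unfold Spec_detect_gender_by_name_prefix; infer_instance

-- ===== CLAIM (what is proved, stated in full; the proofs are below) =====
def Claim_equal_detect_gender_by_name_prefix : Prop := ∀ (name : String) (male_prefixes : List String) (female_prefixes : List String), Dom_detect_gender_by_name_prefix name male_prefixes female_prefixes → Spec_detect_gender_by_name_prefix name male_prefixes female_prefixes (detect_gender_by_name_prefix name male_prefixes female_prefixes)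

-- ===== LEMMAS AND PROOFS =====

-- A's loop returns some tag exactly when some lowered prefix is a prefix of n
theorem pvScanA_eq (n : List Char) (ps : List String) (tag : String) :
    pvScanA n ps tag =
      (if ∃ p ∈ ps, PySem.Chars.lower p.toList <+: n then some tag else none) := by
  induction ps with
  | nil => simp [pvScanA]
  | cons p rest ih =>
      simp only [pvScanA, ih]
      by_cases h : PySem.Chars.startswith n (PySem.Chars.lower p.toList) = true
      · have hp : PySem.Chars.lower p.toList <+: n := (PySem.Chars.startswith_iff _ _).1 h
        simp [h, hp]
      · have hp : ¬ PySem.Chars.lower p.toList <+: n := fun hc =>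
          h ((PySem.Chars.startswith_iff _ _).2 hc)
        simp only [h]
        by_cases hr : ∃ q ∈ rest, PySem.Chars.lower q.toList <+: n
        · simp [hr]
        · simp [hr, hp]

-- B's probe holds exactly when some lowered prefix is a prefix of n
theorem pvProbe_iff (n : List Char) (ps : List String) :
    pvProbe n (pvPrefixSet ps) = true ↔
      ∃ p ∈ ps, PySem.Chars.lower p.toList <+: n := by
  unfold pvProbe pvPrefixSet
  rw [List.any_eq_true]
  constructor
  · rintro ⟨L, hL, hc⟩
    rw [Bool.and_eq_true] at hc
    obtain ⟨q, hq, rfl⟩ := List.mem_map.1 ((PySem.Set.mem_ofList _ _).1 hL)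
    rw [PySem.List.slice_to n (Int.natCast_nonneg _)] at hc
    have hmem : n.take (q.length : Int).toNat ∈ ps.map (fun p => PySem.Chars.lower p.toList) :=
      (PySem.Set.mem_ofList _ _).1 ((PySem.Set.contains_iff _ _).1 hc.2)
    obtain ⟨p, hp, hpe⟩ := List.mem_map.1 hmem
    exact ⟨p, hp, hpe ▸ List.take_prefix _ _⟩
  · rintro ⟨p, hp, hpre⟩
    have hlen : (PySem.Chars.lower p.toList).length ≤ n.length := hpre.length_le
    have hmemset : PySem.Chars.lower p.toList ∈
        PySem.Set.ofList (ps.map (fun p => PySem.Chars.lower p.toList)) :=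
      (PySem.Set.mem_ofList _ _).2 (List.mem_map.2 ⟨p, hp, rfl⟩)
    refine ⟨((PySem.Chars.lower p.toList).length : Int), ?_, ?_⟩
    · exact (PySem.Set.mem_ofList _ _).2 (List.mem_map.2 ⟨_, hmemset, rfl⟩)
    · rw [Bool.and_eq_true]
      refine ⟨by simpa using hlen, ?_⟩
      rw [PySem.List.slice_to n (Int.natCast_nonneg _)]
      have htake : n.take (PySem.Chars.lower p.toList).length = PySem.Chars.lower p.toList :=
        (List.prefix_iff_eq_take.1 hpre).symm
      rw [Int.toNat_natCast, htake]
      exact (PySem.Set.contains_iff _ _).2 hmemset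

-- ===== VERDICT (by name: the statement is the Claim_ definition above) =====
theorem detect_gender_by_name_prefix_spec : Claim_equal_detect_gender_by_name_prefix := by
  intro name mp fp _
  unfold Spec_detect_gender_by_name_prefix detect_gender_by_name_prefix detect_gender_by_name_prefix_alt
  by_cases hn : name = ""
  · simp [hn]
  · simp only [hn, if_false]
    set n := PySem.Chars.strip (PySem.Chars.lower name.toList) with hdef
    rw [pvScanA_eq, pvScanA_eq]
    by_cases hf : ∃ p ∈ fp, PySem.Chars.lower p.toList <+: n
    · simp [hf, (pvProbe_iff n fp).2 hf]
    · have hfb : pvProbe n (pvPrefixSet fp) = false := by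
        rw [Bool.eq_false_iff]; intro hc; exact hf ((pvProbe_iff n fp).1 hc)
      by_cases hm : ∃ p ∈ mp, PySem.Chars.lower p.toList <+: n
      · simp [hf, hfb, hm, (pvProbe_iff n mp).2 hm]
      · have hmb : pvProbe n (pvPrefixSet mp) = false := by
          rw [Bool.eq_false_iff]; intro hc; exact hm ((pvProbe_iff n mp).1 hc)
        simp [hf, hfb, hm, hmb]
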